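-- pv_equiv track=rewrite | github.com/cote-to-job/eunseo | 4w_2025_2_389480.py | solution
-- ===== SOURCE A (Python) =====
-- def solution(info, n, m):
--     # dp는 (현재 A,B 누적)
--     dp = {(0, 0)}
--
--
--     for a_item, b_item in info:
--         next_dp = set()
--         for a_trace, b_trace in dp:
--             # 1. A 도둑이 물건을 훔치는 경우
--             new_a = a_trace + a_item
--             if new_a < n:  # A의 누적 흔적이 n 미만이어야 함
--                 next_dp.add((new_a, b_trace))
--
--             # 2. B 도둑이 해당 물건을 훔치는 경우
--             new_b = b_trace + b_item
--             if new_b < m:  # B의 누적 흔적이 m 미만이어야 함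
--                 next_dp.add((a_trace, new_b))
--         dp = next_dp
--         # valid한 상태가 없다면 실패
--         if not dp:
--             return -1
--
--     # A의 누적 흔적이 최소인 값을 반환
--     a_min=120 #a최대값 설정
--     for a,b in dp:
--         a_min = min(a, a_min)
--     return a_min
-- ===== SOURCE B (Python) =====
-- def solution(info, n, m):
--     # DP keyed by B's cumulative trace only, storing the minimal A-trace for it.
--     best = {0: 0}
--     for a_item, b_item in info:
--         nxt = {}
--         for b, a in best.items():
--             na = a + a_item
--             if na < n and (b not in nxt or na < nxt[b]):
--                 nxt[b] = na
--             nb = b + b_item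
--             if nb < m and (nb not in nxt or a < nxt[nb]):
--                 nxt[nb] = a
--         if not nxt:
--             return -1
--         best = nxt
--     return min(min(best.values()), 120)
-- ===== Notes on version B (the rewrite author's own statement) =====
-- stated objective: faster
-- what changed: Instead of carrying the whole set of reachable (a_trace,b_trace) pairs, B keeps a dict keyed by b_trace holding only the minimal a_trace per b_trace (dominated states are dropped), which is exact because transitions and the final minimum are monotone in a_trace.
import Mathlib
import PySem

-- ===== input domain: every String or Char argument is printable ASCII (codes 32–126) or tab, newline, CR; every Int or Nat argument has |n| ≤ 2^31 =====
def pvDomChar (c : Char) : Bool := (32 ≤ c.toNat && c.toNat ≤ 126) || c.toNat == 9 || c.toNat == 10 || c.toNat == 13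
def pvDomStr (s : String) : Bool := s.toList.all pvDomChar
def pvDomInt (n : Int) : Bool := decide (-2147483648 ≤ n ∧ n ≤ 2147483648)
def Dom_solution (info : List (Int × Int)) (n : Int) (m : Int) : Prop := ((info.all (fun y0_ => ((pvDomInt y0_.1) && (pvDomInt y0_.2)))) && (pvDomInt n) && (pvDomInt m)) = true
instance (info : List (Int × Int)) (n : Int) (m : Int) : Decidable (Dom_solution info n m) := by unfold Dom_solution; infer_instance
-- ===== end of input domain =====

-- B replaces A's set of reachable (a_trace, b_trace) pairs by a dict keyed by b_trace holding the
-- minimal a_trace per b_trace (dominated states dropped); exact, and faster since the state shrinks.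


-- ===== PORT A =====
-- inner 'for a_trace, b_trace in dp' loop of one iteration of A's main loop
def solStepA (n m ai bi : Int) (dp : PySem.Set (Int × Int)) : PySem.Set (Int × Int) :=
  dp.foldl (fun next_dp p =>
    let new_a := p.1 + ai
    let next_dp1 := if new_a < n then PySem.Set.add next_dp (new_a, p.2) else next_dp
    let new_b := p.2 + bi
    if new_b < m then PySem.Set.add next_dp1 (p.1, new_b) else next_dp1)
    PySem.Set.empty

-- A's main loop; 'none' models the early 'return -1'
def solLoopA (n m : Int) : List (Int × Int) → PySem.Set (Int × Int) → Option (PySem.Set (Int × Int))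
  | [], dp => some dp
  | item :: rest, dp =>
      let next := solStepA n m item.1 item.2 dp
      if next.isEmpty then none else solLoopA n m rest next

def solution (info : List (Int × Int)) (n : Int) (m : Int) : Int :=
  match solLoopA n m info (PySem.Set.ofList [((0 : Int), (0 : Int))]) with
  | none => -1
  | some dp => dp.foldl (fun a_min p => min p.1 a_min) 120

-- ===== PORT B =====
-- inner 'for b, a in best.items()' loop of one iteration of B's main loop
def solStepB (n m ai bi : Int) (best : PySem.Dict Int Int) : PySem.Dict Int Int :=
  best.items.foldl (fun nxt p =>
    let na := p.2 + ai
    let nxt1 := if na < n ∧ (nxt.contains p.1 = false ∨ na < nxt.getD p.1 0) then nxt.insert p.1 na else nxt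
    let nb := p.1 + bi
    if nb < m ∧ (nxt1.contains nb = false ∨ p.2 < nxt1.getD nb 0) then nxt1.insert nb p.2 else nxt1)
    PySem.Dict.empty

-- B's main loop; 'none' models the early 'return -1'
def solLoopB (n m : Int) : List (Int × Int) → PySem.Dict Int Int → Option (PySem.Dict Int Int)
  | [], best => some best
  | item :: rest, best =>
      let nxt := solStepB n m item.1 item.2 best
      if nxt.items.isEmpty then none else solLoopB n m rest nxt

def solution_alt (info : List (Int × Int)) (n : Int) (m : Int) : Int :=
  match solLoopB n m info (PySem.Dict.ofList [((0 : Int), (0 : Int))]) with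
  | none => -1
  | some best =>
      match PySem.List.min? best.values (fun v => v) with
      | some v => min v 120
      | none => 120   -- unreachable: the loop never yields an empty dict (Python's min would raise)

-- ===== PRECONDITION & SPEC =====
def Spec_solution (info : List (Int × Int)) (n : Int) (m : Int) (out : Int) : Prop := out = solution_alt info n m
instance (info : List (Int × Int)) (n : Int) (m : Int) (out : Int) : Decidable (Spec_solution info n m out) := by unfold Spec_solution; infer_instance

-- ===== CLAIM (what is proved, stated in full; the proofs are below) =====
def Claim_equal_solution : Prop := ∀ (info : List (Int × Int)) (n : Int) (m : Int), Dom_solution info n m → Spec_solution info n m (solution info n m)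

-- ===== LEMMAS AND PROOFS =====

-- minimal a-trace stored in S for a given b-trace (may be none)
def minAt (S : List (Int × Int)) (b : Int) : Option Int :=
  (S.filterMap (fun p => if p.2 = b then some p.1 else none)).min?

-- the simulation invariant: f's keys are unique and f's entry at b is the least a with (a,b) ∈ S
def relSF (S : List (Int × Int)) (f : PySem.Dict Int Int) : Prop :=
  f.keys.Nodup ∧ ∀ b, f.get? b = minAt S b

-- candidate values one dict item p = (b, a) contributes at key k in solStepB
def candsOf (n m ai bi : Int) (p : Int × Int) (k : Int) : List Int :=
  (if p.1 = k ∧ p.2 + ai < n then [p.2 + ai] else []) ++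
  (if p.1 + bi = k ∧ p.1 + bi < m then [p.2] else [])

def cands (n m ai bi : Int) (l : List (Int × Int)) (k : Int) : List Int :=
  l.flatMap (fun p => candsOf n m ai bi p k)

-- running minimum over a list, starting from an optional current minimum
def ominRun (o : Option Int) (l : List Int) : Option Int :=
  l.foldl (fun o x => some (min (o.getD x) x)) o

theorem ominRun_some (v : Int) (l : List Int) : ominRun (some v) l = some (l.foldl min v) := by
  induction l generalizing v with
  | nil => rfl
  | cons x xs ih => simp [ominRun, List.foldl] at ih ⊢; exact ih _

theorem ominRun_none_eq_min? (l : List Int) : ominRun none l = l.min? := by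
  cases l with
  | nil => rfl
  | cons x xs =>
      show ominRun (some (min x x)) xs = _
      rw [min_self, ominRun_some]
      rfl

theorem ominRun_append (o : Option Int) (l1 l2 : List Int) :
    ominRun o (l1 ++ l2) = ominRun (ominRun o l1) l2 := by
  simp [ominRun, List.foldl_append]

-- two Int lists where each contains a lower bound for every element of the other have equal min?
theorem min?_congr_pred (l1 l2 : List Int)
    (hsub : ∀ x ∈ l1, x ∈ l2) (hdom : ∀ x ∈ l2, ∃ y ∈ l1, y ≤ x) :
    l1.min? = l2.min? := by
  cases h2 : l2.min? with
  | none =>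
      rw [List.min?_eq_none_iff] at h2 ⊢
      subst h2
      cases l1 with
      | nil => rfl
      | cons x xs => exact absurd (hsub x (by simp)) (by simp)
  | some v =>
      rw [List.min?_eq_some_iff] at h2 ⊢
      obtain ⟨hv2, hb2⟩ := h2
      obtain ⟨y, hy1, hyv⟩ := hdom v hv2
      have : v ≤ y := hb2 y (hsub y hy1)
      have hyv' : y = v := le_antisymm hyv this
      subst hyv'
      exact ⟨hy1, fun b hb => hb2 b (hsub b hb)⟩

theorem minAt_eq_some_iff (S : List (Int × Int)) (b v : Int) :
    minAt S b = some v ↔ ((v, b) ∈ S ∧ ∀ a, (a, b) ∈ S → v ≤ a) := by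
  unfold minAt
  rw [List.min?_eq_some_iff]
  constructor
  · rintro ⟨hv, hb⟩
    simp only [List.mem_filterMap] at hv
    obtain ⟨p, hp, hpe⟩ := hv
    split_ifs at hpe with h
    cases hpe
    constructor
    · have : p = (p.1, p.2) := rfl
      rw [h] at this; rwa [this] at hp
    · intro a ha
      exact hb a (by simp only [List.mem_filterMap]; exact ⟨(a, b), ha, by simp⟩)
  · rintro ⟨hv, hb⟩
    constructor
    · simp only [List.mem_filterMap]; exact ⟨(v, b), hv, by simp⟩
    · intro x hx
      simp only [List.mem_filterMap] at hx
      obtain ⟨p, hp, hpe⟩ := hx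
      split_ifs at hpe with h
      cases hpe
      refine hb _ ?_
      have : p = (p.1, p.2) := rfl
      rw [h] at this; rwa [this] at hp

theorem minAt_exists (S : List (Int × Int)) {a b : Int} (h : (a, b) ∈ S) :
    ∃ v, minAt S b = some v ∧ v ≤ a := by
  cases hm : minAt S b with
  | none =>
      unfold minAt at hm
      rw [List.min?_eq_none_iff, List.filterMap_eq_nil_iff] at hm
      have := hm (a, b) h
      simp at this
  | some v =>
      rw [minAt_eq_some_iff] at hm
      exact ⟨v, rfl, hm.2 a h⟩

-- membership in the projection list used by minAt
theorem mem_projAt (S : List (Int × Int)) (b x : Int) :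
    x ∈ S.filterMap (fun p => if p.2 = b then some p.1 else none) ↔ (x, b) ∈ S := by
  simp only [List.mem_filterMap]
  constructor
  · rintro ⟨⟨a2, b2⟩, hp, he⟩
    split_ifs at he with h
    cases he
    cases h
    exact hp
  · intro h
    exact ⟨(x, b), h, by simp⟩

-- membership in the set built by A's inner loop
theorem memA_elem (n m ai bi : Int) (acc : PySem.Set (Int × Int)) (q x : Int × Int) :
    x ∈ ((fun (next_dp : PySem.Set (Int × Int)) (p : Int × Int) =>
      let new_a := p.1 + ai
      let next_dp1 := if new_a < n then PySem.Set.add next_dp (new_a, p.2) else next_dp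
      let new_b := p.2 + bi
      if new_b < m then PySem.Set.add next_dp1 (p.1, new_b) else next_dp1) acc q) ↔
    x ∈ acc ∨ (q.1 + ai < n ∧ x = (q.1 + ai, q.2)) ∨ (q.2 + bi < m ∧ x = (q.1, q.2 + bi)) := by
  by_cases h1 : q.1 + ai < n <;> by_cases h2 : q.2 + bi < m <;>
    simp [h1, h2, PySem.Set.mem_add] <;> tauto

theorem memA_fold (n m ai bi : Int) (l : List (Int × Int)) (acc : PySem.Set (Int × Int)) (x : Int × Int) :
    x ∈ l.foldl (fun next_dp p =>
      let new_a := p.1 + ai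
      let next_dp1 := if new_a < n then PySem.Set.add next_dp (new_a, p.2) else next_dp
      let new_b := p.2 + bi
      if new_b < m then PySem.Set.add next_dp1 (p.1, new_b) else next_dp1) acc ↔
    x ∈ acc ∨ ∃ p ∈ l, (p.1 + ai < n ∧ x = (p.1 + ai, p.2)) ∨ (p.2 + bi < m ∧ x = (p.1, p.2 + bi)) := by
  induction l generalizing acc with
  | nil => simp
  | cons q t ih =>
      rw [List.foldl_cons, ih, memA_elem]
      simp only [List.mem_cons]
      constructor
      · rintro ((hx | hc) | ⟨p, hp, hc⟩)
        · exact Or.inl hx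
        · exact Or.inr ⟨q, Or.inl rfl, hc⟩
        · exact Or.inr ⟨p, Or.inr hp, hc⟩
      · rintro (hx | ⟨p, (rfl | hp), hc⟩)
        · exact Or.inl (Or.inl hx)
        · exact Or.inl (Or.inr hc)
        · exact Or.inr ⟨p, hp, hc⟩

theorem mem_stepA (n m ai bi : Int) (S : List (Int × Int)) (x : Int × Int) :
    x ∈ solStepA n m ai bi S ↔
    ∃ p ∈ S, (p.1 + ai < n ∧ x = (p.1 + ai, p.2)) ∨ (p.2 + bi < m ∧ x = (p.1, p.2 + bi)) := by
  rw [solStepA, memA_fold]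
  simp [PySem.Set.empty]

-- one conditional minimum-insert, seen through get?
theorem condInsert_get? (d : PySem.Dict Int Int) (key cand k : Int) :
    (if d.contains key = false ∨ cand < d.getD key 0 then d.insert key cand else d).get? k
      = if key = k then some (min ((d.get? k).getD cand) cand) else d.get? k := by
  by_cases hk : key = k
  · subst hk
    cases hg : d.get? key with
    | none =>
        have hc : d.contains key = false := by
          rw [PySem.Dict.contains_eq_isSome_get?, hg]; rfl
        simp [hc, PySem.Dict.get?_insert]
    | some v =>
        have hc : d.contains key = true := by
          rw [PySem.Dict.contains_eq_isSome_get?, hg]; rfl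
        have hgd : d.getD key 0 = v := by
          rw [PySem.Dict.getD_eq_get?_getD, hg]; rfl
        by_cases hlt : cand < v
        · simp [hc, hgd, hlt, PySem.Dict.get?_insert, min_eq_right (le_of_lt hlt)]
        · simp [hc, hgd, hlt, hg, min_eq_left (le_of_not_gt hlt)]
  · split_ifs with hcond
    · rw [PySem.Dict.get?_insert, if_neg (fun h => hk h.symm)]
    · rfl

-- one element step of B's inner loop, seen through get?
theorem stepB_elem_get? (n m ai bi : Int) (acc : PySem.Dict Int Int) (p : Int × Int) (k : Int) :
    ((fun (nxt : PySem.Dict Int Int) (p : Int × Int) =>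
      let na := p.2 + ai
      let nxt1 := if na < n ∧ (nxt.contains p.1 = false ∨ na < nxt.getD p.1 0) then nxt.insert p.1 na else nxt
      let nb := p.1 + bi
      if nb < m ∧ (nxt1.contains nb = false ∨ p.2 < nxt1.getD nb 0) then nxt1.insert nb p.2 else nxt1) acc p).get? k
      = ominRun (acc.get? k) (candsOf n m ai bi p k) := by
  simp only []
  have step1 : ∀ (d : PySem.Dict Int Int) (key cand : Int) (cond : Prop) [Decidable cond],
      (if cond ∧ (d.contains key = false ∨ cand < d.getD key 0) then d.insert key cand else d).get? k
        = ominRun (d.get? k) (if key = k ∧ cond then [cand] else []) := by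
    intro d key cand cond _
    by_cases hcond : cond
    · have : (cond ∧ (d.contains key = false ∨ cand < d.getD key 0)) ↔ (d.contains key = false ∨ cand < d.getD key 0) := by tauto
      rw [if_congr this rfl rfl, condInsert_get?]
      by_cases hk : key = k
      · simp [hk, hcond, ominRun]
      · simp [hk, hcond, ominRun]
    · simp [hcond, ominRun]
  rw [step1, step1, candsOf]
  simp only [ominRun, List.foldl_append]

theorem stepB_fold_get? (n m ai bi : Int) (l : List (Int × Int)) (acc : PySem.Dict Int Int) (k : Int) :
    (l.foldl (fun nxt p =>
      let na := p.2 + ai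
      let nxt1 := if na < n ∧ (nxt.contains p.1 = false ∨ na < nxt.getD p.1 0) then nxt.insert p.1 na else nxt
      let nb := p.1 + bi
      if nb < m ∧ (nxt1.contains nb = false ∨ p.2 < nxt1.getD nb 0) then nxt1.insert nb p.2 else nxt1) acc).get? k
      = ominRun (acc.get? k) (cands n m ai bi l k) := by
  induction l generalizing acc with
  | nil => rfl
  | cons q t ih =>
      rw [List.foldl_cons, ih]
      conv_rhs => rw [cands, List.flatMap_cons, ← cands]
      rw [ominRun_append, stepB_elem_get?]

theorem get?_stepB (n m ai bi : Int) (f : PySem.Dict Int Int) (k : Int) :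
    (solStepB n m ai bi f).get? k = (cands n m ai bi f.items k).min? := by
  rw [solStepB, stepB_fold_get?, PySem.Dict.get?_empty, ominRun_none_eq_min?]

theorem nodup_stepB_fold (n m ai bi : Int) (l : List (Int × Int)) (acc : PySem.Dict Int Int)
    (h : acc.keys.Nodup) :
    (l.foldl (fun nxt p =>
      let na := p.2 + ai
      let nxt1 := if na < n ∧ (nxt.contains p.1 = false ∨ na < nxt.getD p.1 0) then nxt.insert p.1 na else nxt
      let nb := p.1 + bi
      if nb < m ∧ (nxt1.contains nb = false ∨ p.2 < nxt1.getD nb 0) then nxt1.insert nb p.2 else nxt1) acc).keys.Nodup := by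
  induction l generalizing acc with
  | nil => exact h
  | cons q t ih =>
      rw [List.foldl_cons]
      apply ih
      simp only []
      split_ifs <;>
        first
          | exact h
          | exact PySem.Dict.nodup_keys_insert _ _ _ h
          | exact PySem.Dict.nodup_keys_insert _ _ _ (PySem.Dict.nodup_keys_insert _ _ _ h)

theorem nodup_stepB (n m ai bi : Int) (f : PySem.Dict Int Int) :
    (solStepB n m ai bi f).keys.Nodup := by
  apply nodup_stepB_fold
  simp [PySem.Dict.nodup_keys_empty]

theorem mem_cands (n m ai bi : Int) (l : List (Int × Int)) (k x : Int) :
    x ∈ cands n m ai bi l k ↔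
    ∃ p ∈ l, (p.1 = k ∧ p.2 + ai < n ∧ x = p.2 + ai) ∨ (p.1 + bi = k ∧ p.1 + bi < m ∧ x = p.2) := by
  simp only [cands, List.mem_flatMap, candsOf, List.mem_append]
  constructor
  · rintro ⟨p, hp, h⟩
    refine ⟨p, hp, ?_⟩
    rcases h with h | h <;> split_ifs at h with hc <;> simp at h <;> tauto
  · rintro ⟨p, hp, h⟩
    refine ⟨p, hp, ?_⟩
    rcases h with ⟨h1, h2, rfl⟩ | ⟨h1, h2, rfl⟩
    · exact Or.inl (by rw [if_pos ⟨h1, h2⟩]; simp)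
    · exact Or.inr (by rw [if_pos ⟨h1, h2⟩]; simp)

theorem rel_step (n m ai bi : Int) (S : List (Int × Int)) (f : PySem.Dict Int Int)
    (hrel : relSF S f) : relSF (solStepA n m ai bi S) (solStepB n m ai bi f) := by
  obtain ⟨hnd, hget⟩ := hrel
  refine ⟨nodup_stepB n m ai bi f, fun b => ?_⟩
  rw [get?_stepB, minAt]
  apply min?_congr_pred
  · -- every candidate of B's step is an a-value of A's next set at b
    intro x hx
    rw [mem_projAt]
    rw [mem_cands] at hx
    obtain ⟨p, hp, hc⟩ := hx
    have hgp : f.get? p.1 = some p.2 := by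
      have : p = (p.1, p.2) := rfl
      exact PySem.Dict.get?_of_mem_items f (this ▸ hp) hnd
    rw [hget p.1, minAt_eq_some_iff] at hgp
    rw [mem_stepA]
    rcases hc with ⟨hk, hlt, rfl⟩ | ⟨hk, hlt, rfl⟩
    · exact ⟨(p.2, p.1), hgp.1, Or.inl ⟨hlt, by rw [hk]⟩⟩
    · exact ⟨(p.2, p.1), hgp.1, Or.inr ⟨hk ▸ hlt, by rw [hk]⟩⟩
  · -- every a-value of A's next set at b is dominated by some candidate of B's step
    intro x hx
    rw [mem_projAt, mem_stepA] at hx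
    obtain ⟨q, hq, hc⟩ := hx
    have hqS : (q.1, q.2) ∈ S := hq
    obtain ⟨v, hv, hvle⟩ := minAt_exists S hqS
    have hgv : f.get? q.2 = some v := by rw [hget q.2]; exact hv
    have hitem : (q.2, v) ∈ f.items := PySem.Dict.mem_items_of_get?_eq_some f hgv
    rcases hc with ⟨hlt, he⟩ | ⟨hlt, he⟩
    · obtain ⟨hx1, hx2⟩ := Prod.mk.injEq .. ▸ he
      refine ⟨v + ai, ?_, by omega⟩
      rw [mem_cands]
      exact ⟨(q.2, v), hitem, Or.inl ⟨hx2.symm, by omega, rfl⟩⟩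
    · obtain ⟨hx1, hx2⟩ := Prod.mk.injEq .. ▸ he
      refine ⟨v, ?_, by omega⟩
      rw [mem_cands]
      exact ⟨(q.2, v), hitem, Or.inr ⟨hx2.symm, hx2.symm ▸ hlt, rfl⟩⟩

theorem rel_empty (S : List (Int × Int)) (f : PySem.Dict Int Int) (hrel : relSF S f) :
    S = [] ↔ f.items = [] := by
  obtain ⟨hnd, hget⟩ := hrel
  constructor
  · intro hS
    subst hS
    cases hi : f.items with
    | nil => rfl
    | cons q t =>
        have hq : (q.1, q.2) ∈ f.items := by rw [hi]; exact List.mem_cons_self ..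
        have := PySem.Dict.get?_of_mem_items f hq hnd
        rw [hget q.1, minAt_eq_some_iff] at this
        exact absurd this.1 (by simp)
  · intro hf
    cases hS : S with
    | nil => rfl
    | cons q t =>
        have hq : (q.1, q.2) ∈ S := by rw [hS]; exact List.mem_cons_self ..
        obtain ⟨v, hv, _⟩ := minAt_exists S hq
        have : f.get? q.2 = some v := by rw [hget q.2]; exact hv
        have := PySem.Dict.mem_items_of_get?_eq_some f this
        rw [hf] at this
        exact absurd this (by simp)

theorem loop_rel (n m : Int) (info : List (Int × Int)) :
    ∀ (S : List (Int × Int)) (f : PySem.Dict Int Int), relSF S f → S ≠ [] →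
    (solLoopA n m info S = none ∧ solLoopB n m info f = none) ∨
    ∃ S' f', solLoopA n m info S = some S' ∧ solLoopB n m info f = some f' ∧ relSF S' f' ∧ S' ≠ [] := by
  induction info with
  | nil =>
      intro S f hrel hne
      exact Or.inr ⟨S, f, rfl, rfl, hrel, hne⟩
  | cons item rest ih =>
      intro S f hrel _
      have hrel' := rel_step n m item.1 item.2 S f hrel
      by_cases he : solStepA n m item.1 item.2 S = []
      · have hf : (solStepB n m item.1 item.2 f).items = [] := (rel_empty _ _ hrel').mp he
        left
        constructor
        · show (if (solStepA n m item.1 item.2 S).isEmpty then none else _) = none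
          rw [he]; rfl
        · show (if (solStepB n m item.1 item.2 f).items.isEmpty then none else _) = none
          rw [hf]; rfl
      · have hf : (solStepB n m item.1 item.2 f).items ≠ [] := fun h => he ((rel_empty _ _ hrel').mpr h)
        have h1 : solLoopA n m (item :: rest) S = solLoopA n m rest (solStepA n m item.1 item.2 S) := by
          show (if (solStepA n m item.1 item.2 S).isEmpty then none else _) = _
          rw [if_neg (by simpa [List.isEmpty_iff] using he)]
        have h2 : solLoopB n m (item :: rest) f = solLoopB n m rest (solStepB n m item.1 item.2 f) := by
          show (if (solStepB n m item.1 item.2 f).items.isEmpty then none else _) = _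
          rw [if_neg (by simpa [List.isEmpty_iff] using hf)]
        rw [h1, h2]
        exact ih _ _ hrel' he

theorem rel_init : relSF (PySem.Set.ofList [((0 : Int), (0 : Int))]) (PySem.Dict.ofList [((0 : Int), (0 : Int))]) := by
  constructor
  · decide
  · intro b
    have h0 : PySem.Set.ofList [((0 : Int), (0 : Int))] = [((0 : Int), (0 : Int))] := by decide
    have h1 : (PySem.Dict.ofList [((0 : Int), (0 : Int))]) = PySem.Dict.empty.insert 0 0 := by decide
    rw [h0, h1, PySem.Dict.get?_insert, minAt]
    by_cases hb : b = 0
    · simp [hb, PySem.Dict.get?_empty]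
    · simp [hb, PySem.Dict.get?_empty, show ¬(0 : Int) = b from fun h => hb h.symm]

theorem final_eq (S : List (Int × Int)) (f : PySem.Dict Int Int) (hrel : relSF S f) (hne : S ≠ []) :
    S.foldl (fun a_min p => min p.1 a_min) 120 =
      (match PySem.List.min? f.values (fun v => v) with
       | some v => min v 120
       | none => 120) := by
  obtain ⟨hnd, hget⟩ := hrel
  -- the A-side running minimum is a plain foldl min over the first components
  have hfold : S.foldl (fun a_min p => min p.1 a_min) 120 = (S.map Prod.fst).foldl min 120 := by
    rw [List.foldl_map]
    exact PySem.List.foldl_congr_mem (l := S) (init := 120) (h := fun acc x _ => min_comm x.1 acc)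
  -- f.values is nonempty
  obtain ⟨q, hq⟩ := List.exists_mem_of_ne_nil S hne
  have hqS : (q.1, q.2) ∈ S := hq
  obtain ⟨w, hw, _⟩ := minAt_exists S hqS
  have : f.get? q.2 = some w := by rw [hget q.2]; exact hw
  have hwv : w ∈ f.values := by
    have := PySem.Dict.mem_items_of_get?_eq_some f this
    simp only [PySem.Dict.values]
    exact List.mem_map_of_mem this
  cases hmv : PySem.List.min? f.values (fun v => v) with
  | none =>
      rw [PySem.List.min?_eq_none_iff] at hmv
      rw [hmv] at hwv
      exact absurd hwv (by simp)
  | some v0 =>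
      have hv0mem : v0 ∈ f.values := PySem.List.min?_mem hmv
      have hv0min : ∀ y ∈ f.values, v0 ≤ y := PySem.List.min?_isMin hmv
      -- v0 is a first component of some element of S
      have hv0S : v0 ∈ S.map Prod.fst := by
        simp only [PySem.Dict.values, List.mem_map] at hv0mem
        obtain ⟨p, hp, he⟩ := hv0mem
        have : f.get? p.1 = some p.2 := by
          have hpe : p = (p.1, p.2) := rfl
          exact PySem.Dict.get?_of_mem_items f (hpe ▸ hp) hnd
        rw [hget p.1, minAt_eq_some_iff] at this
        exact List.mem_map.mpr ⟨(p.2, p.1), this.1, he⟩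
      rw [hfold]
      have hle := PySem.List.foldl_min_le (S.map Prod.fst) 120
      have hmem := PySem.List.foldl_min_mem (S.map Prod.fst) 120
      apply le_antisymm
      · exact le_min (hle.2 v0 hv0S) hle.1
      · rcases hmem with hm | hm
        · rw [hm]; exact min_le_right _ _
        · simp only [List.mem_map] at hm
          obtain ⟨p, hp, he⟩ := hm
          obtain ⟨w', hw', hwle⟩ := minAt_exists S (show (p.1, p.2) ∈ S from hp)
          have hg' : f.get? p.2 = some w' := by rw [hget p.2]; exact hw'
          have hw'v : w' ∈ f.values := by
            have := PySem.Dict.mem_items_of_get?_eq_some f hg'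
            simp only [PySem.Dict.values]
            exact List.mem_map_of_mem this
          calc min v0 120 ≤ v0 := min_le_left _ _
            _ ≤ w' := hv0min w' hw'v
            _ ≤ p.1 := hwle
            _ = _ := he

-- ===== VERDICT (by name: the statement is the Claim_ definition above) =====
theorem solution_spec : Claim_equal_solution := by
  unfold Claim_equal_solution
  intro info n m _
  unfold Spec_solution solution solution_alt
  rcases loop_rel n m info _ _ rel_init (by decide) with ⟨h1, h2⟩ | ⟨S', f', h1, h2, hrel, hne⟩
  · rw [h1, h2]
  · rw [h1, h2]
    exact final_eq S' f' hrel hne
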